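-- pv_equiv track=rewrite | github.com/vtw-developers/PiREL | backend/duoglotcore-server/p_templates.py | does_need_secret_fn_insertion
-- ===== SOURCE A (Python) =====
-- from typing import List, Union
--
-- def does_need_secret_fn_insertion(template: str) -> bool:
--   '''
--   NOTE current implementation is written with Python source code in mind.
--   For other languages we may need different implementation.
--   '''
--   def _count_leading_spaces(text: str) -> int:
--     return len(text) - len(text.lstrip(' '))
--   def _get_indentations_set(lines: List[str]) -> List[int]:
--     return list(set(map(_count_leading_spaces, lines)))
--   lines = template.split('\n')
--   # NOTE very sketchy
--   lines = [line for line in lines if 'pirel_context_hole' not in line and '__' in line]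
--   # assert len(lines) > 0
--   if len(lines) == 1:
--     return False
--   if len(_get_indentations_set(lines)) > 1:
--     return True
--   return False
-- ===== SOURCE B (Python) =====
-- def does_need_secret_fn_insertion(template: str) -> bool:
--   first = None
--   for line in template.split('\n'):
--     if 'pirel_context_hole' in line or '__' not in line:
--       continue
--     n = len(line) - len(line.lstrip(' '))
--     if first is None:
--       first = n
--     elif n != first:
--       return True
--   return False
-- ===== Notes on version B (the rewrite author's own statement) =====
-- stated objective: simpler
-- what changed: Replaces the build-a-list/build-a-set pipeline (split, filter comprehension, set of all indentations, two length checks) with a single fused early-exit pass that remembers only the first indentation seen and returns True as soon as a filtered line's indentation differs.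
import Mathlib
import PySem

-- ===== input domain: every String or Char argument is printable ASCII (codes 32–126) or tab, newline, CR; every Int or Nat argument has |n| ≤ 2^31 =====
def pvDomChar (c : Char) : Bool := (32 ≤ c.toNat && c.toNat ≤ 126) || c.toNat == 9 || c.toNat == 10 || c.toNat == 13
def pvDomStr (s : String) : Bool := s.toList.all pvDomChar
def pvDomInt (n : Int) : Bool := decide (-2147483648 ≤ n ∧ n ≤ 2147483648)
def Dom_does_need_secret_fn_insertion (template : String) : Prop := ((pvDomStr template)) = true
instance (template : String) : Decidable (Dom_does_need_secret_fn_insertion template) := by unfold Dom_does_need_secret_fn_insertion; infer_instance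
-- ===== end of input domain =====

-- B replaces A's split/filter/set pipeline by one fused early-exit pass tracking only the first
-- indentation seen (objective: simpler). Same return value on every input; no side effects.

-- ===== PORT A =====
-- shared literal constants of the source
def pvHole : List Char := "pirel_context_hole".toList
def pvDunder : List Char := ['_', '_']

-- _count_leading_spaces: len(text) - len(text.lstrip(' ')); lstrip(' ') strips exactly spaces
-- from the left, ported by hand as dropWhile (· == ' ') (exact for that chars argument).
def pvCountLeading (l : List Char) : Int :=
  PySem.Chars.len l - PySem.Chars.len (l.dropWhile (· == ' '))

def does_need_secret_fn_insertion (template : String) : Bool :=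
  let lines := PySem.Chars.splitOn template.toList ['\n']
  let lines := lines.filter (fun l => !(PySem.Chars.isIn pvHole l) && PySem.Chars.isIn pvDunder l)
  if lines.length == 1 then false
  else if 1 < (PySem.Set.ofList (lines.map pvCountLeading)).length then true
  else false

-- ===== PORT B =====
-- the for-loop of Source B: skip non-matching lines, remember the first indentation, early-exit on a differing one
def pvAltLoop (lines : List (List Char)) (first : Option Int) : Bool :=
  match lines with
  | [] => false
  | l :: rest =>
    if PySem.Chars.isIn pvHole l || !(PySem.Chars.isIn pvDunder l) then
      pvAltLoop rest first
    else
      let n : Int := PySem.Chars.len l - PySem.Chars.len (l.dropWhile (· == ' '))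
      match first with
      | none => pvAltLoop rest (some n)
      | some f => if n ≠ f then true else pvAltLoop rest (some f)

def does_need_secret_fn_insertion_alt (template : String) : Bool :=
  pvAltLoop (PySem.Chars.splitOn template.toList ['\n']) none

-- ===== PRECONDITION & SPEC =====
def Spec_does_need_secret_fn_insertion (template : String) (out : Bool) : Prop := out = does_need_secret_fn_insertion_alt template
instance (template : String) (out : Bool) : Decidable (Spec_does_need_secret_fn_insertion template out) := by unfold Spec_does_need_secret_fn_insertion; infer_instance

-- ===== CLAIM (what is proved, stated in full; the proofs are below) =====
def Claim_equal_does_need_secret_fn_insertion : Prop := ∀ (template : String), Dom_does_need_secret_fn_insertion template → Spec_does_need_secret_fn_insertion template (does_need_secret_fn_insertion template)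

-- ===== LEMMAS AND PROOFS =====
-- proof-only: B's loop on the already-filtered list of indentation counts
def pvLoopF : List Int → Option Int → Bool
  | [], _ => false
  | c :: cs, none => pvLoopF cs (some c)
  | c :: cs, some f => if c ≠ f then true else pvLoopF cs (some f)

lemma pvAltLoop_eq_loopF (ls : List (List Char)) (first : Option Int) :
    pvAltLoop ls first
      = pvLoopF ((ls.filter (fun l => !(PySem.Chars.isIn pvHole l) && PySem.Chars.isIn pvDunder l)).map pvCountLeading) first := by
  induction ls generalizing first with
  | nil => rfl
  | cons l rest ih =>
    by_cases h1 : PySem.Chars.isIn pvHole l = true <;>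
    by_cases h2 : PySem.Chars.isIn pvDunder l = true <;>
      cases first <;>
      simp [pvAltLoop, pvLoopF, pvCountLeading, h1, h2, ih]

lemma pvLoopF_some (cs : List Int) (f : Int) :
    pvLoopF cs (some f) = !cs.all (fun c => c == f) := by
  induction cs with
  | nil => rfl
  | cons c cs ih =>
    by_cases h : c = f <;> simp [pvLoopF, h, ih]

lemma pvSet_len (c : Int) (cs : List Int) :
    decide (1 < (PySem.Set.ofList (c :: cs)).length) = !cs.all (fun x => x == c) := by
  have h : PySem.Set.ofList (c :: cs) = PySem.Set.update [c] cs := by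
    simp [PySem.Set.ofList_eq_foldl, PySem.Set.update, PySem.Set.add, PySem.Set.contains]
  rw [h, PySem.Set.update_eq_append_filter]
  rcases h2 : (PySem.Set.ofList cs).filter (fun y => !(PySem.Set.contains [c] y)) with _ | ⟨y, ys⟩
  · have hall : cs.all (fun x => x == c) = true := by
      rw [List.all_eq_true]
      intro x hx
      have hk := List.filter_eq_nil_iff.1 h2 x ((PySem.Set.mem_ofList cs x).2 hx)
      simpa using hk
    simp [hall]
  · have hmem : y ∈ (PySem.Set.ofList cs).filter (fun y => !(PySem.Set.contains [c] y)) := by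
      rw [h2]; exact List.mem_cons_self
    have hy : y ∈ cs ∧ ¬ y = c := by simpa [PySem.Set.mem_ofList] using hmem
    have hall : cs.all (fun x => x == c) = false := by
      rw [List.all_eq_false]
      exact ⟨y, hy.1, by simp [hy.2]⟩
    simp [hall]

lemma pvMain (cs : List Int) :
    (if cs.length == 1 then false
     else if 1 < (PySem.Set.ofList cs).length then true else false) = pvLoopF cs none := by
  match cs with
  | [] => rfl
  | [c] => rfl
  | c :: c2 :: cs' =>
    have hlen : ((c :: c2 :: cs').length == 1) = false := by simp
    rw [hlen]
    rw [show pvLoopF (c :: c2 :: cs') none = pvLoopF (c2 :: cs') (some c) from rfl,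
        pvLoopF_some, ← pvSet_len]
    simp

-- ===== VERDICT (by name: the statement is the Claim_ definition above) =====
theorem does_need_secret_fn_insertion_spec : Claim_equal_does_need_secret_fn_insertion := by
  intro template _
  unfold Spec_does_need_secret_fn_insertion does_need_secret_fn_insertion does_need_secret_fn_insertion_alt
  rw [pvAltLoop_eq_loopF, ← pvMain]
  simp
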